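-- pv_equiv track=rewrite | github.com/InternScience/SciEvalKit | scieval/agents/EarthLink/utils/common.py | get_host_path_from_container_path
-- ===== SOURCE A (Python) =====
-- def get_container_bind_path_map(container_cmd: list):
--     bind_map = {}
--     for i in range(len(container_cmd)-1):
--         if container_cmd[i] == "--bind":
--             splits = container_cmd[i+1].split(":")
--             if not (len(splits) in [2, 3]):
--                 assert False, f"Invalid bind mount format: {container_cmd[i+1]}"
--             if len(splits) == 3:
--                 splits = splits[:2]
--             host_path, container_path = splits
--             bind_map[container_path] = host_path
--     return bind_map
--
-- def get_host_path_from_container_path(container_cmd: list, container_path: str):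
--     bind_map = get_container_bind_path_map(container_cmd)
--     keys = sorted(bind_map.keys(), key=lambda x: -len(x))
--     for key in keys:
--         if container_path.startswith(key):
--             relative_path = container_path[len(key):]
--             return bind_map[key] + relative_path
--
--     raise ValueError(f"Container path '{container_path}' not found in bind mounts.")
-- ===== SOURCE B (Python) =====
-- def get_container_bind_path_map(container_cmd: list):
--     bind_map = {}
--     for i in range(len(container_cmd)-1):
--         if container_cmd[i] == "--bind":
--             splits = container_cmd[i+1].split(":")
--             if not (len(splits) in [2, 3]):
--                 assert False, f"Invalid bind mount format: {container_cmd[i+1]}"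
--             if len(splits) == 3:
--                 splits = splits[:2]
--             host_path, container_path = splits
--             bind_map[container_path] = host_path
--     return bind_map
--
-- def get_host_path_from_container_path(container_cmd: list, container_path: str):
--     bind_map = get_container_bind_path_map(container_cmd)
--     best_key = None
--     best_host = None
--     for key, host in bind_map.items():
--         if container_path.startswith(key) and (best_key is None or len(key) > len(best_key)):
--             best_key = key
--             best_host = host
--     if best_key is None:
--         raise ValueError(f"Container path '{container_path}' not found in bind mounts.")
--     return best_host + container_path[len(best_key):]
-- ===== Notes on version B (the rewrite author's own statement) =====
-- stated objective: alternative
-- what changed: Replaced A's sort-keys-by-descending-length-then-return-first-prefix-match with a single max-tracking pass over bind_map.items() that records the longest matching key.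
import Mathlib
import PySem

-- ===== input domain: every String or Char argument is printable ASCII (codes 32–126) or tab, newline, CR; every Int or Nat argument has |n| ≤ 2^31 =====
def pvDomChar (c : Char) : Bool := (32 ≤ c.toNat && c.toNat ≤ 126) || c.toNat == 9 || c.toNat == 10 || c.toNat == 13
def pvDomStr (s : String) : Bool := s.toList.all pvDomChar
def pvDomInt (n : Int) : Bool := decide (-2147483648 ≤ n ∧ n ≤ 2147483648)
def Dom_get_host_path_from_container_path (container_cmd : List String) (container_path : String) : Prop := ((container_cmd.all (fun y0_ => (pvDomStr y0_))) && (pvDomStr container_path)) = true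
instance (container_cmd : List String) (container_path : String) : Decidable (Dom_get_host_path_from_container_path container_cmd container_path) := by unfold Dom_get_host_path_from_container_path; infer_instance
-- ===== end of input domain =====

-- B replaces A's sort-keys-by-descending-length-then-first-prefix-match with a single
-- max-tracking pass over the bind map's items (alternative algorithm, same result).

-- ===== PORT A =====
-- shared helper: both Pythons call the same get_container_bind_path_map
-- one loop step of get_container_bind_path_map (the body of the 'for i in range(...)' loop)
-- the body of the 'if container_cmd[i] == "--bind"' branch, given splits = container_cmd[i+1].split(":")
def pvInsertBind (bind_map : PySem.Dict String String) (splits : List String) : PySem.Dict String String :=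
  if splits.length = 2 ∨ splits.length = 3 then
    -- 'if len(splits) == 3: splits = splits[:2]' then 'host_path, container_path = splits'
    bind_map.insert ((if splits.length = 3 then PySem.List.slice splits none (some 2) else splits).getD 1 "")
                    ((if splits.length = 3 then PySem.List.slice splits none (some 2) else splits).getD 0 "")
  else
    bind_map  -- Python: 'assert False' (AssertionError); such inputs are excluded by Pre_

def pvBindStep (container_cmd : List String) (bind_map : PySem.Dict String String) (i : Int) : PySem.Dict String String :=
  if PySem.List.pyGetD container_cmd i "" == "--bind" then
    -- s.split(":"): sep ≠ "" so split? is some; getD [] is exact here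
    pvInsertBind bind_map ((PySem.Str.split? (PySem.List.pyGetD container_cmd (i + 1) "") ":").getD [])
  else
    bind_map

def get_container_bind_path_map (container_cmd : List String) : PySem.Dict String String :=
  (PySem.List.pyRange 0 ((container_cmd.length : Int) - 1) 1).foldl (pvBindStep container_cmd) PySem.Dict.empty

-- A's 'for key in keys: if container_path.startswith(key): return ...' loop; none = fell through
def pvFindA (bind_map : PySem.Dict String String) (container_path : String) : List String → Option String
  | [] => none
  | key :: rest =>
    if PySem.Str.startswith container_path key then
      -- bind_map[key]: key ∈ keys here, so the "" default is never used
      some (bind_map.getD key "" ++ PySem.Str.slice container_path (some (PySem.Str.len key)) none)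
    else
      pvFindA bind_map container_path rest

def get_host_path_from_container_path (container_cmd : List String) (container_path : String) : String :=
  let bind_map := get_container_bind_path_map container_cmd
  let keys := PySem.List.sorted bind_map.keys (fun x => -(PySem.Str.len x)) false
  -- none = 'raise ValueError(...)': excluded by Pre_
  (pvFindA bind_map container_path keys).getD ""

-- ===== PORT B =====
-- B's loop body: keep (best_key, best_host) when longer prefix match found
def pvStepB (container_path : String) (best : Option (String × String)) (p : String × String) : Option (String × String) :=
  if PySem.Str.startswith container_path p.1 &&
      (match best with
       | none => true
       | some b => decide (PySem.Str.len b.1 < PySem.Str.len p.1)) then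
    some p
  else
    best

def get_host_path_from_container_path_alt (container_cmd : List String) (container_path : String) : String :=
  let bind_map := get_container_bind_path_map container_cmd
  match bind_map.items.foldl (pvStepB container_path) none with
  | some (best_key, best_host) =>
      best_host ++ PySem.Str.slice container_path (some (PySem.Str.len best_key)) none
  | none => ""  -- 'raise ValueError(...)': excluded by Pre_

-- ===== PRECONDITION & SPEC =====
-- Pre_ excludes exactly the inputs on which Python A raises: a "--bind" whose argument does not
-- split on ":" into 2 or 3 pieces (AssertionError), and a container_path matched by no bind key
-- (ValueError). A returns normally on every other input.
def Pre_get_host_path_from_container_path (container_cmd : List String) (container_path : String) : Prop :=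
  (∀ i ∈ List.range (container_cmd.length - 1), container_cmd.getD i "" = "--bind" →
      ((PySem.Str.split? (container_cmd.getD (i + 1) "") ":").getD []).length = 2 ∨
      ((PySem.Str.split? (container_cmd.getD (i + 1) "") ":").getD []).length = 3)
  ∧ ∃ i ∈ List.range (container_cmd.length - 1), container_cmd.getD i "" = "--bind" ∧
      PySem.Str.startswith container_path
        (((PySem.Str.split? (container_cmd.getD (i + 1) "") ":").getD []).getD 1 "") = true

instance (container_cmd : List String) (container_path : String) : Decidable (Pre_get_host_path_from_container_path container_cmd container_path) := by
  unfold Pre_get_host_path_from_container_path; infer_instance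

def pvWitness_get_host_path_from_container_path : List String × String := (["--bind", "/h:/c"], "/c/x")

def Spec_get_host_path_from_container_path (container_cmd : List String) (container_path : String) (out : String) : Prop := out = get_host_path_from_container_path_alt container_cmd container_path
instance (container_cmd : List String) (container_path : String) (out : String) : Decidable (Spec_get_host_path_from_container_path container_cmd container_path out) := by unfold Spec_get_host_path_from_container_path; infer_instance

-- ===== CLAIM (what is proved, stated in full; the proofs are below) =====
def Claim_equal_get_host_path_from_container_path : Prop := ∀ (container_cmd : List String) (container_path : String), Dom_get_host_path_from_container_path container_cmd container_path → Pre_get_host_path_from_container_path container_cmd container_path → Spec_get_host_path_from_container_path container_cmd container_path (get_host_path_from_container_path container_cmd container_path)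

-- ===== LEMMAS AND PROOFS =====

-- "k is a prefix match for container_path"
def PvMatch (container_path k : String) : Prop := PySem.Str.startswith container_path k = true

-- two prefix matches of the same length are the same string
lemma pvMatch_eq_of_len_eq {cp k1 k2 : String} (h1 : PvMatch cp k1) (h2 : PvMatch cp k2)
    (hl : PySem.Str.len k1 = PySem.Str.len k2) : k1 = k2 := by
  unfold PvMatch at h1 h2
  rw [PySem.Str.startswith_eq, PySem.Chars.startswith_iff] at h1 h2
  rw [PySem.Str.len_eq, PySem.Str.len_eq, Nat.cast_inj] at hl
  rw [← String.toList_inj]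
  exact List.IsPrefix.eq_of_length (List.prefix_of_prefix_length_le h1 h2 (le_of_eq hl)) hl

-- keys stay Nodup through the bind-map building loop
lemma pvBindStep_nodup (cmd : List String) (d : PySem.Dict String String) (i : Int)
    (h : d.keys.Nodup) : (pvBindStep cmd d i).keys.Nodup := by
  unfold pvBindStep pvInsertBind
  split_ifs <;> first | exact h | exact PySem.Dict.nodup_keys_insert _ _ _ h

lemma pv_nodup_fold (cmd : List String) (l : List Int) (d : PySem.Dict String String)
    (h : d.keys.Nodup) : (l.foldl (pvBindStep cmd) d).keys.Nodup := by
  induction l generalizing d with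
  | nil => exact h
  | cons x t ih => exact ih _ (pvBindStep_nodup cmd d x h)

lemma pv_nodup_bind_map (cmd : List String) : (get_container_bind_path_map cmd).keys.Nodup := by
  unfold get_container_bind_path_map
  exact pv_nodup_fold cmd _ _ PySem.Dict.nodup_keys_empty

-- membership in keys is preserved by the loop
lemma pvBindStep_mem (cmd : List String) (d : PySem.Dict String String) (i : Int) {k : String}
    (h : k ∈ d.keys) : k ∈ (pvBindStep cmd d i).keys := by
  unfold pvBindStep pvInsertBind
  split_ifs <;> first | exact h | exact (PySem.Dict.mem_keys_insert _ _ _ _).mpr (Or.inr h)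

lemma pv_mem_fold (cmd : List String) (l : List Int) (d : PySem.Dict String String) {k : String}
    (h : k ∈ d.keys) : k ∈ (l.foldl (pvBindStep cmd) d).keys := by
  induction l generalizing d with
  | nil => exact h
  | cons x t ih => exact ih _ (pvBindStep_mem cmd d x h)

-- the container key of a valid "--bind" at position i ends up in the keys of the fold
lemma pv_key_mem_fold (cmd : List String) (l : List Int) (d : PySem.Dict String String) (i : Int)
    (hb : PySem.List.pyGetD cmd i "" = "--bind")
    (hs : ((PySem.Str.split? (PySem.List.pyGetD cmd (i + 1) "") ":").getD []).length = 2 ∨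
          ((PySem.Str.split? (PySem.List.pyGetD cmd (i + 1) "") ":").getD []).length = 3)
    (hi : i ∈ l) :
    ((PySem.Str.split? (PySem.List.pyGetD cmd (i + 1) "") ":").getD []).getD 1 "" ∈
      (l.foldl (pvBindStep cmd) d).keys := by
  induction l generalizing d with
  | nil => cases hi
  | cons x t ih =>
    rcases List.mem_cons.mp hi with hx | hx
    · subst hx
      rw [List.foldl_cons]
      apply pv_mem_fold
      unfold pvBindStep
      rw [hb]
      simp only [beq_self_eq_true, if_true]
      unfold pvInsertBind
      rw [if_pos hs]
      set sp := (PySem.Str.split? (PySem.List.pyGetD cmd (i + 1) "") ":").getD [] with hsp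
      have hkey : (if sp.length = 3 then PySem.List.slice sp none (some 2) else sp).getD 1 "" = sp.getD 1 "" := by
        split_ifs with h3
        · rw [PySem.List.slice_to sp (by norm_num)]
          simp [List.getD_eq_getElem?_getD]
        · rfl
      rw [hkey]
      exact (PySem.Dict.mem_keys_insert _ _ _ _).mpr (Or.inl rfl)
    · rw [List.foldl_cons]
      exact ih _ hx

-- an element of keys comes from some item
lemma pv_mem_keys_exists (d : PySem.Dict String String) {k : String} (h : k ∈ d.keys) :
    ∃ v, (k, v) ∈ d.items := by
  simp only [PySem.Dict.keys, List.mem_map] at h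
  obtain ⟨p, hp, hpe⟩ := h
  refine ⟨p.2, ?_⟩
  rw [← hpe]
  simpa using hp

-- "p is a longest prefix-matching item"
def PvBest (items : List (String × String)) (cp : String) (p : String × String) : Prop :=
  p ∈ items ∧ PvMatch cp p.1 ∧
  ∀ q ∈ items, PvMatch cp q.1 → PySem.Str.len q.1 ≤ PySem.Str.len p.1

-- a nonempty set of matches has a longest one
lemma pv_exists_best (items : List (String × String)) (cp : String)
    (h : ∃ p ∈ items, PvMatch cp p.1) : ∃ b, PvBest items cp b := by
  induction items with
  | nil => obtain ⟨p, hp, _⟩ := h; cases hp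
  | cons a t ih =>
    by_cases ht : ∃ p ∈ t, PvMatch cp p.1
    · obtain ⟨b, hb, hPb, hmax⟩ := ih ht
      by_cases ha : PvMatch cp a.1 ∧ PySem.Str.len b.1 < PySem.Str.len a.1
      · exact ⟨a, List.mem_cons_self, ha.1, by
          intro q hq hPq
          rcases List.mem_cons.mp hq with rfl | hq
          · exact le_refl _
          · exact le_of_lt (lt_of_le_of_lt (hmax q hq hPq) ha.2)⟩
      · refine ⟨b, List.mem_cons_of_mem _ hb, hPb, ?_⟩
        intro q hq hPq
        rcases List.mem_cons.mp hq with rfl | hq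
        · by_contra hlt
          exact ha ⟨hPq, lt_of_not_ge hlt⟩
        · exact hmax q hq hPq
    · obtain ⟨p, hp, hPp⟩ := h
      have hpa : p = a := by
        rcases List.mem_cons.mp hp with rfl | hp
        · rfl
        · exact absurd ⟨p, hp, hPp⟩ ht
      subst hpa
      refine ⟨p, List.mem_cons_self, hPp, ?_⟩
      intro q hq hPq
      rcases List.mem_cons.mp hq with rfl | hq
      · exact le_refl _
      · exact absurd ⟨q, hq, hPq⟩ ht

-- A's scan over a length-descending key list returns the longest match
lemma pv_findA_eq (d : PySem.Dict String String) (cp : String) (b : String × String)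
    (ks : List String)
    (hsort : ks.Pairwise (fun x y => PySem.Str.len y ≤ PySem.Str.len x))
    (hmem : b.1 ∈ ks) (hPb : PvMatch cp b.1)
    (hmax : ∀ k ∈ ks, PvMatch cp k → PySem.Str.len k ≤ PySem.Str.len b.1)
    (hget : d.getD b.1 "" = b.2) :
    pvFindA d cp ks = some (b.2 ++ PySem.Str.slice cp (some (PySem.Str.len b.1)) none) := by
  induction ks with
  | nil => cases hmem
  | cons k t ih =>
    rcases List.pairwise_cons.mp hsort with ⟨hk, ht⟩
    by_cases hP : PySem.Str.startswith cp k = true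
    · have hle : PySem.Str.len k ≤ PySem.Str.len b.1 := hmax k List.mem_cons_self hP
      have hge : PySem.Str.len b.1 ≤ PySem.Str.len k := by
        rcases List.mem_cons.mp hmem with rfl | hmem
        · exact le_refl _
        · exact hk b.1 hmem
      have hkb : k = b.1 := pvMatch_eq_of_len_eq hP hPb (le_antisymm hle hge)
      unfold pvFindA
      rw [if_pos hP, hkb, hget]
    · have hmem' : b.1 ∈ t := by
        rcases List.mem_cons.mp hmem with rfl | hmem
        · exact absurd hPb hP
        · exact hmem
      unfold pvFindA
      rw [if_neg hP]
      exact ih ht hmem' (fun q hq => hmax q (List.mem_cons_of_mem _ hq))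

-- once the longest match is in hand, B's fold never replaces it
lemma pv_stayB (cp : String) (b : String × String) (t : List (String × String))
    (h : ∀ q ∈ t, PvMatch cp q.1 → PySem.Str.len q.1 ≤ PySem.Str.len b.1) :
    t.foldl (pvStepB cp) (some b) = some b := by
  induction t with
  | nil => rfl
  | cons q r ih =>
    have hstep : pvStepB cp (some b) q = some b := by
      unfold pvStepB
      rw [if_neg]
      intro hc
      rcases Bool.and_eq_true_iff.mp hc with ⟨h1, h2⟩
      exact absurd (h q List.mem_cons_self h1) (not_le_of_gt (of_decide_eq_true h2))
    rw [List.foldl_cons, hstep]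
    exact ih (fun q hq => h q (List.mem_cons_of_mem _ hq))

-- B's fold finds the (unique) longest match
lemma pv_loopB (cp : String) (b : String × String) (l : List (String × String))
    (acc : Option (String × String))
    (hmem : b ∈ l) (hPb : PvMatch cp b.1)
    (hmax : ∀ q ∈ l, PvMatch cp q.1 → PySem.Str.len q.1 ≤ PySem.Str.len b.1)
    (huniq : ∀ q ∈ l, PvMatch cp q.1 → PySem.Str.len q.1 = PySem.Str.len b.1 → q = b)
    (hacc : acc = none ∨ ∃ c, acc = some c ∧ PySem.Str.len c.1 < PySem.Str.len b.1) :
    l.foldl (pvStepB cp) acc = some b := by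
  induction l generalizing acc with
  | nil => cases hmem
  | cons p t ih =>
    by_cases hpb : p = b
    · subst hpb
      have hstep : pvStepB cp acc p = some p := by
        unfold pvStepB
        rcases hacc with rfl | ⟨c, rfl, hlt⟩
        · rw [if_pos (Bool.and_eq_true_iff.mpr ⟨hPb, rfl⟩)]
        · rw [if_pos (Bool.and_eq_true_iff.mpr ⟨hPb, decide_eq_true hlt⟩)]
      rw [List.foldl_cons, hstep]
      exact pv_stayB cp p t (fun q hq => hmax q (List.mem_cons_of_mem _ hq))
    · have hmem' : b ∈ t := by
        rcases List.mem_cons.mp hmem with rfl | hmem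
        · exact absurd rfl hpb
        · exact hmem
      rw [List.foldl_cons]
      refine ih _ hmem' (fun q hq => hmax q (List.mem_cons_of_mem _ hq))
        (fun q hq => huniq q (List.mem_cons_of_mem _ hq)) ?_
      unfold pvStepB
      split_ifs with hc
      · rcases Bool.and_eq_true_iff.mp hc with ⟨h1, _⟩
        have hle : PySem.Str.len p.1 ≤ PySem.Str.len b.1 := hmax p List.mem_cons_self h1
        have hne : PySem.Str.len p.1 ≠ PySem.Str.len b.1 := fun he => hpb (huniq p List.mem_cons_self h1 he)
        exact Or.inr ⟨p, rfl, lt_of_le_of_ne hle hne⟩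
      · exact hacc

-- there is a prefix-matching item under Pre_
lemma pv_exists_match (cmd : List String) (cp : String)
    (hpre : Pre_get_host_path_from_container_path cmd cp) :
    ∃ p ∈ (get_container_bind_path_map cmd).items, PvMatch cp p.1 := by
  obtain ⟨hvalid, i, hi, hb, hsw⟩ := hpre
  have hilt : i < cmd.length - 1 := List.mem_range.mp hi
  have hmem : (i : Int) ∈ PySem.List.pyRange 0 ((cmd.length : Int) - 1) 1 := by
    rw [PySem.List.mem_pyRange_one]
    constructor
    · exact_mod_cast Int.natCast_nonneg i
    · omega
  have hb' : PySem.List.pyGetD cmd (i : Int) "" = "--bind" := by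
    rw [PySem.List.pyGetD_natCast]; exact hb
  have hcast : ((i : Int) + 1) = ((i + 1 : Nat) : Int) := by push_cast; ring
  have hsplit : (PySem.Str.split? (PySem.List.pyGetD cmd ((i : Int) + 1) "") ":").getD []
      = (PySem.Str.split? (cmd.getD (i + 1) "") ":").getD [] := by
    rw [hcast, PySem.List.pyGetD_natCast]
  -- the precondition's first clause at this i gives the valid-format disjunction
  have hlen := hvalid i hi hb
  have hkey := pv_key_mem_fold cmd (PySem.List.pyRange 0 ((cmd.length : Int) - 1) 1)
    PySem.Dict.empty (i : Int) hb' (by rw [hsplit]; exact hlen) hmem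
  rw [hsplit] at hkey
  obtain ⟨v, hv⟩ := pv_mem_keys_exists _ hkey
  exact ⟨(_, v), hv, hsw⟩

-- with Nodup keys, an item with the same key as b IS b
lemma pv_item_uniq (d : PySem.Dict String String) (hnd : d.keys.Nodup)
    {q b : String × String} (hq : q ∈ d.items) (hb : b ∈ d.items) (hk : q.1 = b.1) : q = b := by
  have h1 := PySem.Dict.get?_of_mem_items d (show (q.1, q.2) ∈ d.items from hq) hnd
  have h2 := PySem.Dict.get?_of_mem_items d (show (b.1, b.2) ∈ d.items from hb) hnd
  rw [hk, h2] at h1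
  exact Prod.ext hk (Option.some_injective _ h1).symm

-- ===== VERDICT (by name: the statement is the Claim_ definition above) =====
theorem get_host_path_from_container_path_spec : Claim_equal_get_host_path_from_container_path := by
  intro cmd cp _ hpre
  unfold Spec_get_host_path_from_container_path
  set d := get_container_bind_path_map cmd with hd
  have hnd : d.keys.Nodup := pv_nodup_bind_map cmd
  obtain ⟨b, hbmem, hPb, hmax⟩ := pv_exists_best d.items cp (pv_exists_match cmd cp hpre)
  obtain ⟨bk, bv⟩ := b
  -- A's side
  have hA : get_host_path_from_container_path cmd cp
      = bv ++ PySem.Str.slice cp (some (PySem.Str.len bk)) none := by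
    have hsort : (PySem.List.sorted d.keys (fun x => -(PySem.Str.len x)) false).Pairwise
        (fun x y => PySem.Str.len y ≤ PySem.Str.len x) := by
      have := PySem.List.sorted_pairwise d.keys (fun x => -(PySem.Str.len x))
      exact this.imp (by intro a c h; simpa using h)
    have hmemk : bk ∈ PySem.List.sorted d.keys (fun x => -(PySem.Str.len x)) false := by
      rw [PySem.List.mem_sorted]
      exact PySem.Dict.mem_keys_of_mem_items d hbmem
    have hmaxk : ∀ k ∈ PySem.List.sorted d.keys (fun x => -(PySem.Str.len x)) false,
        PvMatch cp k → PySem.Str.len k ≤ PySem.Str.len (bk, bv).1 := by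
      intro k hk hPk
      rw [PySem.List.mem_sorted] at hk
      obtain ⟨v, hv⟩ := pv_mem_keys_exists d hk
      exact hmax (k, v) hv hPk
    unfold get_host_path_from_container_path
    rw [← hd]
    show (pvFindA d cp (PySem.List.sorted d.keys (fun x => -(PySem.Str.len x)) false)).getD "" = _
    rw [pv_findA_eq d cp (bk, bv) _ hsort hmemk hPb hmaxk
        (PySem.Dict.getD_of_mem_items d hbmem hnd "")]
    rfl
  -- B's side
  have hB : get_host_path_from_container_path_alt cmd cp
      = bv ++ PySem.Str.slice cp (some (PySem.Str.len bk)) none := by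
    unfold get_host_path_from_container_path_alt
    rw [← hd]
    show (match d.items.foldl (pvStepB cp) none with
          | some (best_key, best_host) =>
              best_host ++ PySem.Str.slice cp (some (PySem.Str.len best_key)) none
          | none => "") = _
    rw [pv_loopB cp (bk, bv) d.items none hbmem hPb hmax ?_ (Or.inl rfl)]
    intro q hq hPq hlen
    exact pv_item_uniq d hnd hq hbmem (pvMatch_eq_of_len_eq hPq hPb hlen)
  rw [hA, hB]
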